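-- pv_equiv track=rewrite | github.com/MLesartre/algobowl | algobowl.py | improveSolver
-- ===== SOURCE A (Python) =====
-- def improveSolver(left, right, connectionmap):
--     hasImprovements = True
--     prevRNum = 0
--     prevLNum = 0
--     while hasImprovements:
--         #Calculates the change that would occur if one node on the left/right would be swapped
--         leftDelta = -1000000
--         leftNum = 0
--         for i in range(1, len(connectionmap)):
--             if i in left:
--                 total = 0
--                 for j in connectionmap[i]:
--                     if j[0] in right:
--                         total += j[1]
--                     else:
--                         total -= j[1]
--                 if(total > leftDelta):
--                     leftDelta = total
--                     leftNum = i
--         #Repeats the calculation on the right side, finding the best change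
--         rightDelta = -1000000
--         rightNum = 0
--         for i in range(1, len(connectionmap)):
--             if i in right:
--                 total = 0
--                 for j in connectionmap[i]:
--                     if j[0] in left:
--                         total += j[1]
--                     else:
--                         total -= j[1]
--                 if(total > rightDelta):
--                     rightDelta = total
--                     rightNum = i
--         #Checks to make sure that the change would actually decrease the cost and that both numbers exist
--         if(leftDelta + rightDelta > 0 and rightNum != 0 and leftNum != 0 and leftNum != prevRNum and rightNum != prevLNum):
--             prevLNum = leftNum
--             prevRNum = rightNum
--             left.remove(leftNum)
--             right.remove(rightNum)
--             left.add(rightNum)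
--             right.add(leftNum)
--         else:
--             #If the best change wouldn't decrease cost, stop improving
--             hasImprovements = False
--
--     return (left, right)
-- ===== SOURCE B (Python) =====
-- def improveSolver(left, right, connectionmap):
--     n = len(connectionmap)
--     # build per-node swap deltas and a reverse adjacency index once
--     tL = {}  # tL[i] = sum(w if a in right else -w for (a, w) in connectionmap[i])
--     tR = {}  # tR[i] = sum(w if a in left  else -w for (a, w) in connectionmap[i])
--     rev = {}  # rev[a] = [(i, w) for every occurrence (a, w) in connectionmap[i]]
--     for i in range(1, n):
--         sL = 0
--         sR = 0
--         for (a, w) in connectionmap[i]: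
--             if a in right:
--                 sL += w
--             else:
--                 sL -= w
--             if a in left:
--                 sR += w
--             else:
--                 sR -= w
--             rev.setdefault(a, []).append((i, w))
--         tL[i] = sL
--         tR[i] = sR
--     prevRNum = 0
--     prevLNum = 0
--     while True:
--         # pick best candidates by scanning the maintained delta tables
--         leftDelta = -1000000
--         leftNum = 0
--         rightDelta = -1000000
--         rightNum = 0
--         for i in range(1, n):
--             if i in left and tL[i] > leftDelta:
--                 leftDelta = tL[i]
--                 leftNum = i
--             if i in right and tR[i] > rightDelta:
--                 rightDelta = tR[i]
--                 rightNum = i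
--         if not (leftDelta + rightDelta > 0 and rightNum != 0 and leftNum != 0
--                 and leftNum != prevRNum and rightNum != prevLNum):
--             return (left, right)
--         prevLNum = leftNum
--         prevRNum = rightNum
--         oldL_l = leftNum in left
--         oldL_r = rightNum in left
--         oldR_l = leftNum in right
--         oldR_r = rightNum in right
--         left.remove(leftNum)
--         right.remove(rightNum)
--         left.add(rightNum)
--         right.add(leftNum)
--         # incremental update: only neighbours of the two flipped nodes change
--         for (x, was_in, now_in, table) in ((leftNum, oldR_l, leftNum in right, tL),
--                                            (rightNum, oldR_r, rightNum in right, tL),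
--                                            (leftNum, oldL_l, leftNum in left, tR),
--                                            (rightNum, oldL_r, rightNum in left, tR)):
--             if was_in != now_in:
--                 step = 2 if now_in else -2
--                 for (i, w) in rev.get(x, ()):
--                     table[i] += step * w
-- ===== Notes on version B (the rewrite author's own statement) =====
-- stated objective: alternative
-- what changed: Instead of recomputing every node's full edge-sum delta on both sides in each loop iteration, B builds the per-node delta tables and a reverse adjacency index once, picks the best candidates by scanning the maintained tables, and after each swap updates only the entries of the two flipped nodes' neighbours incrementally.
import Mathlib
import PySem

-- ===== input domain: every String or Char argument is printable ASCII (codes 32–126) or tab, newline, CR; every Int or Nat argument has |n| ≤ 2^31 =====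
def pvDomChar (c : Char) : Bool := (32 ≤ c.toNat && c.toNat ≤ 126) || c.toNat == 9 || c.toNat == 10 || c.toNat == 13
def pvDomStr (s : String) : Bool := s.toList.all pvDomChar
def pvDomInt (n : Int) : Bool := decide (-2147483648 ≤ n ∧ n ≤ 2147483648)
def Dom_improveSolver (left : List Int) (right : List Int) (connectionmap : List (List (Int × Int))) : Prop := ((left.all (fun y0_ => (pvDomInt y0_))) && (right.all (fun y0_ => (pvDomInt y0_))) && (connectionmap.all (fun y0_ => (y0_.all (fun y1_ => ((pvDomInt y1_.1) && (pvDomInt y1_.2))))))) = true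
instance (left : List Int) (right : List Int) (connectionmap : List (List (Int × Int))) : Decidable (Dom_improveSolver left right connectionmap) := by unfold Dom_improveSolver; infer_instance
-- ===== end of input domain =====

-- ===== PORT A =====
-- B restructures A's recompute-everything local search; equivalence is about the RETURN value
-- (the Python versions also mutate the two argument sets in place, identically).
-- Both ports run the while-loop on a fuel counter larger than the number of distinct loop
-- states, a totality guard only (identical in both, consumed one unit per iteration).

-- total for node i against the opposite set: A's inner 'for j in connectionmap[i]' loop
def pvTotalA (adj : List (Int × Int)) (s : PySem.Set Int) : Int :=
  adj.foldl (fun t j => if PySem.Set.contains s j.1 then t + j.2 else t - j.2) 0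

-- A's 'for i in range(1, len(connectionmap))' best-candidate scan (the same code appears
-- twice in the Python, once per side; it is one helper called twice here)
def pvBestA (cm : List (List (Int × Int))) (memb opp : PySem.Set Int) : Int × Int :=
  (PySem.List.pyRange 1 (cm.length : Int)).foldl
    (fun p i =>
      if PySem.Set.contains memb i then
        if pvTotalA (PySem.List.pyGetD cm i []) opp > p.1 then
          (pvTotalA (PySem.List.pyGetD cm i []) opp, i)
        else p
      else p)
    (-1000000, 0)

def pvLoopA (cm : List (List (Int × Int))) :
    Nat → Int → Int → PySem.Set Int → PySem.Set Int → List Int × List Int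
  | 0, _, _, l, r => (l, r)
  | fuel + 1, pL, pR, l, r =>
    let lp := pvBestA cm l r
    let rp := pvBestA cm r l
    if lp.1 + rp.1 > 0 ∧ rp.2 ≠ 0 ∧ lp.2 ≠ 0 ∧ lp.2 ≠ pR ∧ rp.2 ≠ pL then
      -- left.remove(leftNum); right.remove(rightNum); left.add(rightNum); right.add(leftNum)
      -- (remove = discard here: the removed element is a member)
      pvLoopA cm fuel lp.2 rp.2
        (PySem.Set.add (PySem.Set.discard l lp.2) rp.2)
        (PySem.Set.add (PySem.Set.discard r rp.2) lp.2)
    else (l, r)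

-- shared totality guard: exceeds the number of distinct loop states, so it is never
-- exhausted on runs where the Python loop terminates (used identically by both ports)
def pvFuel (left right : List Int) : Nat :=
  (left.length + right.length + 1) ^ 2 * 4 ^ (left.length + right.length) + 1

def improveSolver (left : List Int) (right : List Int)
    (connectionmap : List (List (Int × Int))) : List Int × List Int :=
  pvLoopA connectionmap (pvFuel left right) 0 0
    (PySem.Set.ofList left) (PySem.Set.ofList right)

-- ===== PORT B =====
-- Source B: one pass builds per-node delta tables tL/tR and a reverse index rev;
-- the loop scans the tables and updates them incrementally after each swap.

-- the body of Source B's build loop for one node i (inner 'for (a, w) in connectionmap[i]')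
def pvBuildStep (l0 r0 : PySem.Set Int) (cm : List (List (Int × Int)))
    (st : PySem.Dict Int Int × PySem.Dict Int Int × PySem.Dict Int (List (Int × Int)))
    (i : Int) :
    PySem.Dict Int Int × PySem.Dict Int Int × PySem.Dict Int (List (Int × Int)) :=
  let q := (PySem.List.pyGetD cm i []).foldl
    (fun (q : Int × Int × PySem.Dict Int (List (Int × Int))) j =>
      ((if PySem.Set.contains r0 j.1 then q.1 + j.2 else q.1 - j.2),
       (if PySem.Set.contains l0 j.1 then q.2.1 + j.2 else q.2.1 - j.2),
       q.2.2.modify j.1 [] (fun ps => ps ++ [(i, j.2)])))   -- rev.setdefault(a, []).append((i, w))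
    (0, 0, st.2.2)
  (st.1.insert i q.1, st.2.1.insert i q.2.1, q.2.2)

def pvBuild (l0 r0 : PySem.Set Int) (cm : List (List (Int × Int))) :
    PySem.Dict Int Int × PySem.Dict Int Int × PySem.Dict Int (List (Int × Int)) :=
  (PySem.List.pyRange 1 (cm.length : Int)).foldl (pvBuildStep l0 r0 cm)
    (PySem.Dict.empty, PySem.Dict.empty, PySem.Dict.empty)

-- Source B's single selection pass updating both (leftDelta, leftNum) and (rightDelta, rightNum)
def pvSelect (n : Int) (l r : PySem.Set Int) (tL tR : PySem.Dict Int Int) :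
    (Int × Int) × (Int × Int) :=
  (PySem.List.pyRange 1 n).foldl
    (fun (p : (Int × Int) × (Int × Int)) i =>
      ((if PySem.Set.contains l i ∧ tL.getD i 0 > p.1.1 then (tL.getD i 0, i) else p.1),
       (if PySem.Set.contains r i ∧ tR.getD i 0 > p.2.1 then (tR.getD i 0, i) else p.2)))
    ((-1000000, 0), (-1000000, 0))

-- one entry of Source B's flip-update loop: walk rev[x] when x's membership changed
def pvFlip (rev : PySem.Dict Int (List (Int × Int))) (tbl : PySem.Dict Int Int)
    (x : Int) (was now : Bool) : PySem.Dict Int Int :=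
  if was ≠ now then
    (rev.getD x []).foldl
      (fun t p => t.modify p.1 0 (fun v => v + (if now then 2 else -2) * p.2)) tbl
  else tbl

def pvLoopB (cm : List (List (Int × Int))) (rev : PySem.Dict Int (List (Int × Int))) :
    Nat → Int → Int → PySem.Set Int → PySem.Set Int →
    PySem.Dict Int Int → PySem.Dict Int Int → List Int × List Int
  | 0, _, _, l, r, _, _ => (l, r)
  | fuel + 1, pL, pR, l, r, tL, tR =>
    let s := pvSelect (cm.length : Int) l r tL tR
    if ¬(s.1.1 + s.2.1 > 0 ∧ s.2.2 ≠ 0 ∧ s.1.2 ≠ 0 ∧ s.1.2 ≠ pR ∧ s.2.2 ≠ pL) then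
      (l, r)
    else
      let lN := s.1.2
      let rN := s.2.2
      let oldLl := PySem.Set.contains l lN
      let oldLr := PySem.Set.contains l rN
      let oldRl := PySem.Set.contains r lN
      let oldRr := PySem.Set.contains r rN
      let l' := PySem.Set.add (PySem.Set.discard l lN) rN
      let r' := PySem.Set.add (PySem.Set.discard r rN) lN
      let tL1 := pvFlip rev tL  lN oldRl (PySem.Set.contains r' lN)
      let tL2 := pvFlip rev tL1 rN oldRr (PySem.Set.contains r' rN)
      let tR1 := pvFlip rev tR  lN oldLl (PySem.Set.contains l' lN)
      let tR2 := pvFlip rev tR1 rN oldLr (PySem.Set.contains l' rN)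
      pvLoopB cm rev fuel lN rN l' r' tL2 tR2

def improveSolver_alt (left : List Int) (right : List Int)
    (connectionmap : List (List (Int × Int))) : List Int × List Int :=
  let l0 := PySem.Set.ofList left
  let r0 := PySem.Set.ofList right
  let b := pvBuild l0 r0 connectionmap
  pvLoopB connectionmap b.2.2 (pvFuel left right) 0 0 l0 r0 b.1 b.2.1

-- ===== PRECONDITION & SPEC =====
def Spec_improveSolver (left : List Int) (right : List Int) (connectionmap : List (List (Int × Int))) (out : List Int × List Int) : Prop := out = improveSolver_alt left right connectionmap
instance (left : List Int) (right : List Int) (connectionmap : List (List (Int × Int))) (out : List Int × List Int) : Decidable (Spec_improveSolver left right connectionmap out) := by unfold Spec_improveSolver; infer_instance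

-- ===== CLAIM (what is proved, stated in full; the proofs are below) =====
def Claim_equal_improveSolver : Prop := ∀ (left : List Int) (right : List Int) (connectionmap : List (List (Int × Int))), Dom_improveSolver left right connectionmap → Spec_improveSolver left right connectionmap (improveSolver left right connectionmap)

-- ===== LEMMAS AND PROOFS =====

-- proof-side abbreviations (sums the incremental updates are measured by)
def pvOcc (adj : List (Int × Int)) (x : Int) : Int :=
  (adj.map (fun j => if j.1 = x then j.2 else 0)).sum

def pvSumAt (ps : List (Int × Int)) (i : Int) : Int :=
  (ps.map (fun p => if p.1 = i then p.2 else 0)).sum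

lemma pv_contains_discard (s : PySem.Set Int) (y a : Int) :
    PySem.Set.contains (PySem.Set.discard s y) a
      = (PySem.Set.contains s a && !(a == y)) := by
  rw [Bool.eq_iff_iff]
  simp [PySem.Set.contains, PySem.Set.discard, List.mem_filter]

lemma pv_contains_add (s : PySem.Set Int) (x a : Int) :
    PySem.Set.contains (PySem.Set.add s x) a
      = (PySem.Set.contains s a || a == x) := by
  unfold PySem.Set.add
  by_cases h : PySem.Set.contains s x = true
  · simp only [h, if_true]
    rw [Bool.eq_iff_iff]
    simp [PySem.Set.contains]
    intro he; subst he; simpa [PySem.Set.contains] using h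
  · simp only [h, if_false]
    rw [Bool.eq_iff_iff]
    simp [PySem.Set.contains]

lemma pvTotalA_congr (adj : List (Int × Int)) (s s' : PySem.Set Int)
    (h : ∀ a, PySem.Set.contains s a = PySem.Set.contains s' a) :
    pvTotalA adj s = pvTotalA adj s' := by
  unfold pvTotalA
  exact PySem.List.foldl_congr_mem _ _ _ _ (by intro acc j _; rw [h j.1])

lemma pvTotalA_eq_sum (adj : List (Int × Int)) (s : PySem.Set Int) :
    pvTotalA adj s
      = (adj.map (fun j => if PySem.Set.contains s j.1 then j.2 else -j.2)).sum := by
  unfold pvTotalA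
  rw [PySem.List.foldl_congr_mem adj _
      (fun t j => t + (if PySem.Set.contains s j.1 then j.2 else -j.2)) 0
      (by intro acc j _
          by_cases h : PySem.Set.contains s j.1 = true
          · simp only [h, reduceIte]
          · simp only [Bool.not_eq_true] at h
            simp only [h, Bool.false_eq_true, reduceIte]; ring)]
  rw [PySem.List.foldl_add]
  ring

lemma pvTotalA_update (adj : List (Int × Int)) (r : PySem.Set Int) (x y : Int)
    (hxy : x ≠ y) (hy : PySem.Set.contains r y = true) :
    pvTotalA adj (PySem.Set.add (PySem.Set.discard r y) x)
      = pvTotalA adj r + (if PySem.Set.contains r x then 0 else 2 * pvOcc adj x)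
          - 2 * pvOcc adj y := by
  have hc : ∀ a, PySem.Set.contains (PySem.Set.add (PySem.Set.discard r y) x) a
      = (PySem.Set.contains r a && !(a == y) || a == x) := by
    intro a; rw [pv_contains_add, pv_contains_discard]
  rw [pvTotalA_eq_sum, pvTotalA_eq_sum]
  induction adj with
  | nil => simp [pvOcc]
  | cons j t ih =>
    simp only [List.map_cons, List.sum_cons, pvOcc] at ih ⊢
    have hstep : (if PySem.Set.contains (PySem.Set.add (PySem.Set.discard r y) x) j.1 then j.2 else -j.2)
        = (if PySem.Set.contains r j.1 then j.2 else -j.2)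
          + (if PySem.Set.contains r x then 0 else 2 * (if j.1 = x then j.2 else 0))
          - 2 * (if j.1 = y then j.2 else 0) := by
      rw [hc]
      have hy' : y ∈ r := by simpa [PySem.Set.contains] using hy
      by_cases h1 : j.1 = x
      · subst h1
        by_cases hx : j.1 ∈ r <;>
          simp [PySem.Set.contains, hx, hxy] <;> ring
      · by_cases h2 : j.1 = y
        · subst h2
          simp [PySem.Set.contains, hy', h1] <;> ring
        · by_cases hj : j.1 ∈ r <;>
            simp [PySem.Set.contains, hj, h1, h2] <;> ring
    rw [hstep, ih]
    by_cases hx : x ∈ r <;> simp [PySem.Set.contains, hx] <;> by_cases hjy : j.1 = y <;>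
      by_cases hjx : j.1 = x <;> simp [hjy, hjx, hxy, Ne.symm hxy] <;> ring

lemma pv_getD_foldl_mod (ps : List (Int × Int)) (t : PySem.Dict Int Int) (c i : Int) :
    (ps.foldl (fun t p => t.modify p.1 0 (fun v => v + c * p.2)) t).getD i 0
      = t.getD i 0 + c * pvSumAt ps i := by
  induction ps generalizing t with
  | nil => simp [pvSumAt]
  | cons p ps ih =>
    simp only [List.foldl_cons]
    rw [ih, PySem.Dict.getD_modify]
    simp only [pvSumAt, List.map_cons, List.sum_cons]
    by_cases h : i = p.1
    · subst h; simp; ring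
    · simp [h, Ne.symm h]

lemma pv_getD_flip (rev : PySem.Dict Int (List (Int × Int))) (tbl : PySem.Dict Int Int)
    (x : Int) (was now : Bool) (i : Int) :
    (pvFlip rev tbl x was now).getD i 0
      = tbl.getD i 0
        + (if was = now then 0
           else (if now then 2 else -2) * pvSumAt (rev.getD x []) i) := by
  unfold pvFlip
  by_cases h : was = now
  · simp [h]
  · simp only [h, if_false, ne_eq, not_false_eq_true, if_true]
    rw [pv_getD_foldl_mod]

lemma pv_rev_step (i : Int) (adj : List (Int × Int))
    (rev0 : PySem.Dict Int (List (Int × Int))) (x i' : Int) :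
    pvSumAt ((adj.foldl (fun rv j => rv.modify j.1 []
        (fun ps => ps ++ [(i, j.2)])) rev0).getD x []) i'
      = pvSumAt (rev0.getD x []) i' + (if i' = i then pvOcc adj x else 0) := by
  induction adj generalizing rev0 with
  | nil => simp [pvOcc]
  | cons j t ih =>
    simp only [List.foldl_cons]
    rw [ih]
    have hmod : pvSumAt ((rev0.modify j.1 [] (fun ps => ps ++ [(i, j.2)])).getD x []) i'
        = pvSumAt (rev0.getD x []) i'
          + (if j.1 = x then (if i' = i then j.2 else 0) else 0) := by
      rw [PySem.Dict.getD_modify]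
      by_cases h : x = j.1
      · subst h; simp [pvSumAt, eq_comm]
      · have h' : ¬ j.1 = x := fun hh => h hh.symm
        simp [h, h']
    rw [hmod]
    simp only [pvOcc, List.map_cons, List.sum_cons]
    by_cases h1 : j.1 = x <;> by_cases h2 : i' = i <;> simp [h1, h2] <;> ring

lemma pv_inner_spec (l0 r0 : PySem.Set Int) (i : Int) (adj : List (Int × Int))
    (rev0 : PySem.Dict Int (List (Int × Int))) :
    adj.foldl (fun (q : Int × Int × PySem.Dict Int (List (Int × Int))) j =>
        ((if PySem.Set.contains r0 j.1 then q.1 + j.2 else q.1 - j.2),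
         (if PySem.Set.contains l0 j.1 then q.2.1 + j.2 else q.2.1 - j.2),
         q.2.2.modify j.1 [] (fun ps => ps ++ [(i, j.2)]))) (0, 0, rev0)
      = (pvTotalA adj r0, pvTotalA adj l0,
         adj.foldl (fun rv j => rv.modify j.1 [] (fun ps => ps ++ [(i, j.2)])) rev0) := by
  rw [PySem.List.foldl_prod_mk
      (fun t (j : Int × Int) => if PySem.Set.contains r0 j.1 then t + j.2 else t - j.2)
      (fun (q : Int × PySem.Dict Int (List (Int × Int))) (j : Int × Int) =>
        ((if PySem.Set.contains l0 j.1 then q.1 + j.2 else q.1 - j.2),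
         q.2.modify j.1 [] (fun ps => ps ++ [(i, j.2)]))) adj 0 (0, rev0)]
  rw [PySem.List.foldl_prod_mk
      (fun t (j : Int × Int) => if PySem.Set.contains l0 j.1 then t + j.2 else t - j.2)
      (fun rv (j : Int × Int) => rv.modify j.1 [] (fun ps => ps ++ [(i, j.2)])) adj 0 rev0]
  rfl

lemma pv_build_fold_spec (l0 r0 : PySem.Set Int) (cm : List (List (Int × Int)))
    (L : List Int) (hnd : L.Nodup)
    (st : PySem.Dict Int Int × PySem.Dict Int Int × PySem.Dict Int (List (Int × Int))) :
    (∀ i, (L.foldl (pvBuildStep l0 r0 cm) st).1.getD i 0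
        = if i ∈ L then pvTotalA (PySem.List.pyGetD cm i []) r0 else st.1.getD i 0)
    ∧ (∀ i, (L.foldl (pvBuildStep l0 r0 cm) st).2.1.getD i 0
        = if i ∈ L then pvTotalA (PySem.List.pyGetD cm i []) l0 else st.2.1.getD i 0)
    ∧ (∀ x i, pvSumAt ((L.foldl (pvBuildStep l0 r0 cm) st).2.2.getD x []) i
        = pvSumAt (st.2.2.getD x []) i
          + (if i ∈ L then pvOcc (PySem.List.pyGetD cm i []) x else 0)) := by
  induction L generalizing st with
  | nil => simp
  | cons i0 L ih =>
    have hnd' := List.nodup_cons.mp hnd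
    simp only [List.foldl_cons]
    have hstep : pvBuildStep l0 r0 cm st i0
        = (st.1.insert i0 (pvTotalA (PySem.List.pyGetD cm i0 []) r0),
           st.2.1.insert i0 (pvTotalA (PySem.List.pyGetD cm i0 []) l0),
           (PySem.List.pyGetD cm i0 []).foldl
             (fun rv j => rv.modify j.1 [] (fun ps => ps ++ [(i0, j.2)])) st.2.2) := by
      unfold pvBuildStep
      rw [pv_inner_spec]
    obtain ⟨h1, h2, h3⟩ := ih hnd'.2 (pvBuildStep l0 r0 cm st i0)
    refine ⟨?_, ?_, ?_⟩
    · intro i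
      rw [h1 i, hstep]
      by_cases hiL : i ∈ L
      · simp [hiL]
      · by_cases hi0 : i = i0
        · subst hi0
          simp [hiL, PySem.Dict.getD_insert]
        · simp [hiL, hi0, PySem.Dict.getD_insert]
    · intro i
      rw [h2 i, hstep]
      by_cases hiL : i ∈ L
      · simp [hiL]
      · by_cases hi0 : i = i0
        · subst hi0
          simp [hiL, PySem.Dict.getD_insert]
        · simp [hiL, hi0, PySem.Dict.getD_insert]
    · intro x i
      rw [h3 x i, hstep]
      simp only
      rw [pv_rev_step]
      by_cases hi0 : i = i0
      · subst hi0
        have hiL : i ∉ L := hnd'.1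
        simp [hiL]
      · by_cases hiL : i ∈ L
        · simp [hiL, hi0]
        · simp [hiL, hi0]

lemma pvBestA_snd_mem (cm : List (List (Int × Int))) (memb opp : PySem.Set Int) :
    (pvBestA cm memb opp).2 = 0
      ∨ PySem.Set.contains memb (pvBestA cm memb opp).2 = true := by
  unfold pvBestA
  have aux : ∀ (K : List Int) (p : Int × Int),
      (p.2 = 0 ∨ PySem.Set.contains memb p.2 = true) →
      ((K.foldl (fun p i =>
        if PySem.Set.contains memb i then
          if pvTotalA (PySem.List.pyGetD cm i []) opp > p.1 then
            (pvTotalA (PySem.List.pyGetD cm i []) opp, i)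
          else p
        else p) p).2 = 0
        ∨ PySem.Set.contains memb (K.foldl (fun p i =>
          if PySem.Set.contains memb i then
            if pvTotalA (PySem.List.pyGetD cm i []) opp > p.1 then
              (pvTotalA (PySem.List.pyGetD cm i []) opp, i)
            else p
          else p) p).2 = true) := by
    intro K
    induction K with
    | nil => intro p h; exact h
    | cons k K ih =>
      intro p h
      simp only [List.foldl_cons]
      apply ih
      by_cases hk : PySem.Set.contains memb k = true
      · by_cases ht : pvTotalA (PySem.List.pyGetD cm k []) opp > p.1
        · simp only [hk, reduceIte, if_pos ht]
          right
          simp [hk]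
        · simp only [hk, reduceIte, if_neg ht]
          exact h
      · have hk' : PySem.Set.contains memb k = false := by simpa using hk
        simp only [hk', Bool.false_eq_true, reduceIte]
        exact h
  exact aux _ _ (Or.inl rfl)

lemma pv_select_eq (cm : List (List (Int × Int))) (l r : PySem.Set Int)
    (tL tR : PySem.Dict Int Int)
    (hL : ∀ i ∈ PySem.List.pyRange 1 (cm.length : Int),
        tL.getD i 0 = pvTotalA (PySem.List.pyGetD cm i []) r)
    (hR : ∀ i ∈ PySem.List.pyRange 1 (cm.length : Int),
        tR.getD i 0 = pvTotalA (PySem.List.pyGetD cm i []) l) :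
    pvSelect (cm.length : Int) l r tL tR = (pvBestA cm l r, pvBestA cm r l) := by
  unfold pvSelect pvBestA
  rw [PySem.List.foldl_prod_mk
      (fun (a : Int × Int) i =>
        if PySem.Set.contains l i ∧ tL.getD i 0 > a.1 then (tL.getD i 0, i) else a)
      (fun (b : Int × Int) i =>
        if PySem.Set.contains r i ∧ tR.getD i 0 > b.1 then (tR.getD i 0, i) else b)
      (PySem.List.pyRange 1 (cm.length : Int)) (-1000000, 0) (-1000000, 0)]
  rw [Prod.mk.injEq]
  constructor
  · apply PySem.List.foldl_congr_mem
    intro acc i hi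
    rw [hL i hi]
    by_cases hc : PySem.Set.contains l i = true
    · by_cases ht : pvTotalA (PySem.List.pyGetD cm i []) r > acc.1
      · simp [hc, ht]
      · simp [hc, ht]
    · have hm : i ∉ l := by simpa [PySem.Set.contains] using hc
      simp [hm]
  · apply PySem.List.foldl_congr_mem
    intro acc i hi
    rw [hR i hi]
    by_cases hc : PySem.Set.contains r i = true
    · by_cases ht : pvTotalA (PySem.List.pyGetD cm i []) l > acc.1
      · simp [hc, ht]
      · simp [hc, ht]
    · have hm : i ∉ r := by simpa [PySem.Set.contains] using hc
      simp [hm]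

lemma pv_delta_L (adj : List (Int × Int)) (r : PySem.Set Int) (lN rN : Int)
    (hr : PySem.Set.contains r rN = true) :
    pvTotalA adj r
      + (if (PySem.Set.contains r lN
              = PySem.Set.contains (PySem.Set.add (PySem.Set.discard r rN) lN) lN) then 0
         else (if PySem.Set.contains (PySem.Set.add (PySem.Set.discard r rN) lN) lN
               then 2 else -2) * pvOcc adj lN)
      + (if (PySem.Set.contains r rN
              = PySem.Set.contains (PySem.Set.add (PySem.Set.discard r rN) lN) rN) then 0
         else (if PySem.Set.contains (PySem.Set.add (PySem.Set.discard r rN) lN) rN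
               then 2 else -2) * pvOcc adj rN)
      = pvTotalA adj (PySem.Set.add (PySem.Set.discard r rN) lN) := by
  by_cases h : lN = rN
  · subst h
    have h2 : ∀ a, PySem.Set.contains (PySem.Set.add (PySem.Set.discard r lN) lN) a
        = PySem.Set.contains r a := by
      intro a
      rw [pv_contains_add, pv_contains_discard]
      by_cases ha : a = lN
      · subst ha
        have hm : a ∈ r := by simpa [PySem.Set.contains] using hr
        simp [hm]
      · have hb : (a == lN) = false := beq_eq_false_iff_ne.mpr ha
        simp [hb]
    rw [pvTotalA_congr adj _ r h2]
    have hm : lN ∈ r := by simpa [PySem.Set.contains] using hr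
    simp [h2, hm]
  · have hNl : PySem.Set.contains (PySem.Set.add (PySem.Set.discard r rN) lN) lN = true := by
      rw [pv_contains_add]; simp
    have hNr : PySem.Set.contains (PySem.Set.add (PySem.Set.discard r rN) lN) rN = false := by
      rw [pv_contains_add, pv_contains_discard]
      have h' : rN ≠ lN := fun hh => h hh.symm
      simp [h']
    rw [pvTotalA_update adj r lN rN h hr]
    simp only [hNl, hNr, hr, Bool.true_eq_false, reduceIte]
    by_cases hx : PySem.Set.contains r lN = true <;> simp [hx] <;> ring

lemma pv_delta_R (adj : List (Int × Int)) (l : PySem.Set Int) (lN rN : Int)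
    (hl : PySem.Set.contains l lN = true) :
    pvTotalA adj l
      + (if (PySem.Set.contains l lN
              = PySem.Set.contains (PySem.Set.add (PySem.Set.discard l lN) rN) lN) then 0
         else (if PySem.Set.contains (PySem.Set.add (PySem.Set.discard l lN) rN) lN
               then 2 else -2) * pvOcc adj lN)
      + (if (PySem.Set.contains l rN
              = PySem.Set.contains (PySem.Set.add (PySem.Set.discard l lN) rN) rN) then 0
         else (if PySem.Set.contains (PySem.Set.add (PySem.Set.discard l lN) rN) rN
               then 2 else -2) * pvOcc adj rN)
      = pvTotalA adj (PySem.Set.add (PySem.Set.discard l lN) rN) := by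
  by_cases h : lN = rN
  · subst h
    have h2 : ∀ a, PySem.Set.contains (PySem.Set.add (PySem.Set.discard l lN) lN) a
        = PySem.Set.contains l a := by
      intro a
      rw [pv_contains_add, pv_contains_discard]
      by_cases ha : a = lN
      · subst ha
        have hm : a ∈ l := by simpa [PySem.Set.contains] using hl
        simp [hm]
      · have hb : (a == lN) = false := beq_eq_false_iff_ne.mpr ha
        simp [hb]
    rw [pvTotalA_congr adj _ l h2]
    have hm : lN ∈ l := by simpa [PySem.Set.contains] using hl
    simp [h2, hm]
  · have hNl : PySem.Set.contains (PySem.Set.add (PySem.Set.discard l lN) rN) lN = false := by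
      rw [pv_contains_add, pv_contains_discard]
      simp [h]
    have hNr : PySem.Set.contains (PySem.Set.add (PySem.Set.discard l lN) rN) rN = true := by
      rw [pv_contains_add]; simp
    have h' : rN ≠ lN := fun hh => h hh.symm
    rw [pvTotalA_update adj l rN lN h' hl]
    simp only [hNl, hNr, hl, Bool.true_eq_false, reduceIte]
    by_cases hx : PySem.Set.contains l rN = true <;> simp [hx] <;> ring

lemma pv_loop_eq (cm : List (List (Int × Int))) (rev : PySem.Dict Int (List (Int × Int)))
    (hrev : ∀ x i, i ∈ PySem.List.pyRange 1 (cm.length : Int) →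
        pvSumAt (rev.getD x []) i = pvOcc (PySem.List.pyGetD cm i []) x) :
    ∀ (fuel : Nat) (pL pR : Int) (l r : PySem.Set Int) (tL tR : PySem.Dict Int Int),
    (∀ i ∈ PySem.List.pyRange 1 (cm.length : Int),
        tL.getD i 0 = pvTotalA (PySem.List.pyGetD cm i []) r) →
    (∀ i ∈ PySem.List.pyRange 1 (cm.length : Int),
        tR.getD i 0 = pvTotalA (PySem.List.pyGetD cm i []) l) →
    pvLoopB cm rev fuel pL pR l r tL tR = pvLoopA cm fuel pL pR l r := by
  intro fuel
  induction fuel with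
  | zero => intro pL pR l r tL tR _ _; rfl
  | succ fuel ih =>
    intro pL pR l r tL tR hL hR
    simp only [pvLoopB, pvLoopA]
    rw [pv_select_eq cm l r tL tR hL hR]
    simp only
    by_cases hc : (pvBestA cm l r).1 + (pvBestA cm r l).1 > 0 ∧ (pvBestA cm r l).2 ≠ 0 ∧
        (pvBestA cm l r).2 ≠ 0 ∧ (pvBestA cm l r).2 ≠ pR ∧ (pvBestA cm r l).2 ≠ pL
    · rw [if_neg (not_not_intro hc), if_pos hc]
      have hlN : PySem.Set.contains l (pvBestA cm l r).2 = true := by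
        rcases pvBestA_snd_mem cm l r with h0 | h0
        · exact absurd h0 hc.2.2.1
        · exact h0
      have hrN : PySem.Set.contains r (pvBestA cm r l).2 = true := by
        rcases pvBestA_snd_mem cm r l with h0 | h0
        · exact absurd h0 hc.2.1
        · exact h0
      apply ih
      · intro i hi
        rw [pv_getD_flip, pv_getD_flip, hL i hi, hrev _ i hi, hrev _ i hi]
        exact pv_delta_L (PySem.List.pyGetD cm i []) r (pvBestA cm l r).2 (pvBestA cm r l).2 hrN
      · intro i hi
        rw [pv_getD_flip, pv_getD_flip, hR i hi, hrev _ i hi, hrev _ i hi]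
        exact pv_delta_R (PySem.List.pyGetD cm i []) l (pvBestA cm l r).2 (pvBestA cm r l).2 hlN
    · rw [if_pos hc, if_neg hc]

-- ===== VERDICT (by name: the statement is the Claim_ definition above) =====
theorem improveSolver_spec : Claim_equal_improveSolver := by
  intro left right cm _
  simp only [Spec_improveSolver, improveSolver, improveSolver_alt, pvBuild]
  obtain ⟨h1, h2, h3⟩ := pv_build_fold_spec (PySem.Set.ofList left) (PySem.Set.ofList right)
      cm (PySem.List.pyRange 1 (cm.length : Int)) (PySem.List.nodup_pyRange_one 1 (cm.length : Int))
      (PySem.Dict.empty, PySem.Dict.empty, PySem.Dict.empty)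
  refine (pv_loop_eq cm _ ?_ _ 0 0 _ _ _ _ ?_ ?_).symm
  · intro x i hi
    rw [h3 x i]
    simp [hi, pvSumAt, PySem.Dict.getD, PySem.Dict.get?, PySem.Dict.empty]
  · intro i hi
    rw [h1 i]
    simp [hi]
  · intro i hi
    rw [h2 i]
    simp [hi]
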